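-- pv_equiv track=rewrite | github.com/iamh2o/rgbw_colorspace_converter | triangle_grid.py | calc_last_row_len
-- ===== SOURCE A (Python) =====
-- def calc_last_row_len(max_row):
--     row_len = 1
--     curr_row = 1
--
--     while curr_row < max_row:
--         if max_row == 1:
--             row_len = 1
--         else:
--             row_len += 2
--         curr_row += 1
--     return row_len
-- ===== SOURCE B (Python) =====
-- def calc_last_row_len(max_row):
--     return max(1, 2 * max_row - 1)
-- ===== Notes on version B (the rewrite author's own statement) =====
-- stated objective: faster
-- what changed: Replaced the O(max_row) increment loop with the closed form max(1, 2*max_row - 1).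
import Mathlib
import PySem

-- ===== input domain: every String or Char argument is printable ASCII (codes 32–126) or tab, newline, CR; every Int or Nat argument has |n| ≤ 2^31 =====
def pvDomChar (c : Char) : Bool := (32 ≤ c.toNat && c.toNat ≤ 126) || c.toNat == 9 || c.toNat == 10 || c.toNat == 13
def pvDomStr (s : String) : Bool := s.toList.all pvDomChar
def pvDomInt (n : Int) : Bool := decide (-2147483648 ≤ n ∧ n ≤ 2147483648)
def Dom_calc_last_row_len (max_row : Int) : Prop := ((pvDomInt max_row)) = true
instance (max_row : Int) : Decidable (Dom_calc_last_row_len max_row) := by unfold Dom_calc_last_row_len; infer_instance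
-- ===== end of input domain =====

-- B replaces A's O(max_row) increment loop with the closed form max(1, 2*max_row - 1).

-- ===== PORT A =====
-- A's while loop: state (row_len, curr_row), step while curr_row < max_row.
def calcLoopA (row_len curr_row max_row : Int) : Int :=
  if _h : curr_row < max_row then
    calcLoopA (if max_row = 1 then 1 else row_len + 2) (curr_row + 1) max_row
  else
    row_len
termination_by (max_row - curr_row).toNat
decreasing_by omega

def calc_last_row_len (max_row : Int) : Int :=
  calcLoopA 1 1 max_row

-- ===== PORT B =====
def calc_last_row_len_alt (max_row : Int) : Int :=
  max 1 (2 * max_row - 1)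

-- ===== PRECONDITION & SPEC =====
def Spec_calc_last_row_len (max_row : Int) (out : Int) : Prop := out = calc_last_row_len_alt max_row
instance (max_row : Int) (out : Int) : Decidable (Spec_calc_last_row_len max_row out) := by unfold Spec_calc_last_row_len; infer_instance

-- ===== CLAIM (what is proved, stated in full; the proofs are below) =====
def Claim_equal_calc_last_row_len : Prop := ∀ (max_row : Int), Dom_calc_last_row_len max_row → Spec_calc_last_row_len max_row (calc_last_row_len max_row)

-- ===== LEMMAS AND PROOFS =====

-- loop invariant: the loop adds 2 per remaining iteration (the max_row = 1 branch is
-- unreachable once curr_row < max_row with curr_row ≥ 1)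
theorem calcLoopA_closed (row_len curr_row max_row : Int) (h1 : 1 ≤ curr_row) :
    calcLoopA row_len curr_row max_row =
      if curr_row < max_row then row_len + 2 * (max_row - curr_row) else row_len := by
  by_cases h : curr_row < max_row
  · have hne : ¬ max_row = 1 := by omega
    rw [calcLoopA, dif_pos h, if_neg hne]
    have ih := calcLoopA_closed (row_len + 2) (curr_row + 1) max_row (by omega)
    rw [ih]
    split_ifs <;> [ring_nf; omega]
  · rw [calcLoopA, dif_neg h, if_neg h]
termination_by (max_row - curr_row).toNat
decreasing_by omega

-- ===== VERDICT (by name: the statement is the Claim_ definition above) =====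
theorem calc_last_row_len_spec : Claim_equal_calc_last_row_len := by
  intro max_row _
  show calc_last_row_len max_row = calc_last_row_len_alt max_row
  unfold calc_last_row_len calc_last_row_len_alt
  rw [calcLoopA_closed 1 1 max_row le_rfl]
  split_ifs <;> omega
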